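-- pv_equiv track=rewrite | github.com/Hnutova1993/tasl21 | subnet_tools/sim_utils/utils.py | is_valid_multi_path
-- ===== SOURCE A (Python) =====
-- from typing import List, Iterable
--
-- def is_valid_path(path:List[int])->bool:
--     # a valid path should have at least 3 return values and return to the source
--     return (len(path)>=3) and (path[0]==path[-1])
--
-- def is_valid_multi_path(paths: List[List[int]], depots: List[int], num_cities)->bool:
--     '''
--     Arguments:
--     paths: list of paths where each path is a list of nodes that start and end at the same node
--     depots: list of nodes indicating the valid sources for each traveling salesman
--
--     Output:
--     boolean indicating if the paths are valid or not
--     '''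
--     assert len(paths) == len(depots), ValueError("Received unequal number of paths to depots. Note that if you choose to not use a salesman, you must still return a corresponding empty path.")
--     # check that each subpath is valid
--     if not all([is_valid_path(path) for path in paths if path != []]):
--         return False
--
--     # check if the source nodes match the depots
--     if not all([path[0]==depots[i] for i, path in enumerate(paths) if path != []]):
--         return False
--
--     # check that each city is only visited once across all salesmen
--     all_non_depot_nodes = []
--     for path in paths:
--         if path != []:
--             all_non_depot_nodes.extend(path[1:-1])
--     assert len(all_non_depot_nodes) == len(set(all_non_depot_nodes)), ValueError("Duplicate Visits")
--     assert set(all_non_depot_nodes) == set(list(range(1,num_cities))), ValueError("Invalid number of cities visited")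
--     return True
-- ===== SOURCE B (Python) =====
-- def is_valid_multi_path(paths, depots, num_cities):
--     assert len(paths) == len(depots), ValueError("Received unequal number of paths to depots. Note that if you choose to not use a salesman, you must still return a corresponding empty path.")
--     visited = []
--     for path, depot in zip(paths, depots):
--         if path:
--             if not (len(path) >= 3 and path[0] == path[-1] == depot):
--                 return False
--             visited += path[1:-1]
--     assert sorted(visited) == list(range(1, num_cities)), ValueError("Duplicate visits or invalid set of cities visited")
--     return True
-- ===== Notes on version B (the rewrite author's own statement) =====
-- stated objective: simpler
-- what changed: A's three staged passes plus two set-based asserts (hash-set dedup count, then set equality with set(range(1,num_cities))) are replaced by one zip loop with a single combined per-path test and a sort-based check: sorted(visited) == list(range(1,num_cities)) expresses uniqueness and coverage in one comparison, correct because a list sorts to 1..num_cities-1 exactly when it is duplicate-free and covers that set.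
import Mathlib
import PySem

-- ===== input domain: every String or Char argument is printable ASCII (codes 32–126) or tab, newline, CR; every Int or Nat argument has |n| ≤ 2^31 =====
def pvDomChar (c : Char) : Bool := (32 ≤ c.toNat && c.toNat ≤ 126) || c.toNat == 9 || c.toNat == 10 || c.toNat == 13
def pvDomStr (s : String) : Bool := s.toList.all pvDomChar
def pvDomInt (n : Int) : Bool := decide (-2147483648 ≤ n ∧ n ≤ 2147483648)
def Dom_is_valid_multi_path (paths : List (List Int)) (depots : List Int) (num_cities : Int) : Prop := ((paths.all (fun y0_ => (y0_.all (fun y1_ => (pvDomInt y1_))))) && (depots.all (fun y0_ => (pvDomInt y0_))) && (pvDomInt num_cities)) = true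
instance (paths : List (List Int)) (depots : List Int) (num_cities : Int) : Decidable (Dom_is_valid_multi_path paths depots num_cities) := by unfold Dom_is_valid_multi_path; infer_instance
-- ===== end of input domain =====

-- B replaces A's three staged passes and two set-based asserts by one zip loop with a combined
-- per-path test and a single sort-based check sorted(visited) == list(range(1, num_cities))
-- (objective: simpler). Where the Python raises AssertionError (excluded by Pre_) both ports
-- return false as a placeholder.

-- ===== PORT A =====
def is_valid_path (path : List Int) : Bool :=
  decide (3 ≤ path.length) && (PySem.List.pyGet? path 0 == PySem.List.pyGet? path (-1))

def is_valid_multi_path (paths : List (List Int)) (depots : List Int) (num_cities : Int) : Bool :=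
  if !(paths.length == depots.length) then false  -- assert raises here: outside Pre_
  else if !((paths.filter (fun p => !(p == []))).all is_valid_path) then false
  else if !((PySem.List.enumerate paths 0).all (fun ip =>
              if ip.2 == [] then true
              else PySem.List.pyGet? ip.2 0 == PySem.List.pyGet? depots ip.1)) then false
  else
    let all_non_depot_nodes :=
      paths.foldl (fun acc p =>
        if !(p == []) then acc ++ PySem.List.slice p (some 1) (some (-1)) else acc) []
    if !(all_non_depot_nodes.length == PySem.Set.len (PySem.Set.ofList all_non_depot_nodes)) then false  -- assert raises: outside Pre_
    else if !(PySem.Set.equal (PySem.Set.ofList all_non_depot_nodes)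
                (PySem.Set.ofList (PySem.List.pyRange 1 num_cities 1))) then false  -- assert raises: outside Pre_
    else true

-- ===== PORT B =====
-- the fused 'for path, depot in zip(paths, depots)' loop of Source B; none = early 'return False'
def pvBLoop : List (List Int × Int) → List Int → Option (List Int)
  | [], visited => some visited
  | pd :: rest, visited =>
    if pd.1 == [] then pvBLoop rest visited
    else if !(decide (3 ≤ pd.1.length) &&
              (PySem.List.pyGet? pd.1 0 == PySem.List.pyGet? pd.1 (-1)) &&
              (PySem.List.pyGet? pd.1 (-1) == some pd.2)) then none
    else pvBLoop rest (visited ++ PySem.List.slice pd.1 (some 1) (some (-1)))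

def is_valid_multi_path_alt (paths : List (List Int)) (depots : List Int) (num_cities : Int) : Bool :=
  if !(paths.length == depots.length) then false  -- assert raises here: outside Pre_
  else
    match pvBLoop (paths.zip depots) [] with
    | none => false
    | some visited =>
      if !(PySem.List.sorted visited (fun x => x) false == PySem.List.pyRange 1 num_cities 1)
      then false  -- assert raises: outside Pre_
      else true

-- ===== PRECONDITION & SPEC =====
-- Pre_ excludes exactly the inputs where the Python A raises AssertionError: unequal lengths of
-- paths/depots, or (no per-path check fails and) the collected interior nodes contain a duplicate
-- or differ as a set from range(1, num_cities).
def pvPathOK (p : List Int) (d : Int) : Bool :=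
  decide (3 ≤ p.length) && (p.head? == p.getLast?) && (p.getLast? == some d)

def pvInterior (p : List Int) : List Int := p.tail.dropLast

def Pre_is_valid_multi_path (paths : List (List Int)) (depots : List Int) (num_cities : Int) : Prop :=
  paths.length = depots.length ∧
  ( ((paths.zip depots).any (fun pr => !(pr.1 == []) && !(pvPathOK pr.1 pr.2))) = true ∨
    ( (paths.flatMap pvInterior).Nodup ∧
      (∀ x ∈ paths.flatMap pvInterior, x ∈ PySem.List.pyRange 1 num_cities 1) ∧
      (∀ x ∈ PySem.List.pyRange 1 num_cities 1, x ∈ paths.flatMap pvInterior) ) )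

instance (paths : List (List Int)) (depots : List Int) (num_cities : Int) : Decidable (Pre_is_valid_multi_path paths depots num_cities) := by unfold Pre_is_valid_multi_path; infer_instance

def pvWitness_is_valid_multi_path : List (List Int) × List Int × Int := ([[0,1,2,0]], [0], 3)

def Spec_is_valid_multi_path (paths : List (List Int)) (depots : List Int) (num_cities : Int) (out : Bool) : Prop := out = is_valid_multi_path_alt paths depots num_cities
instance (paths : List (List Int)) (depots : List Int) (num_cities : Int) (out : Bool) : Decidable (Spec_is_valid_multi_path paths depots num_cities out) := by unfold Spec_is_valid_multi_path; infer_instance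

-- ===== CLAIM (what is proved, stated in full; the proofs are below) =====
def Claim_equal_is_valid_multi_path : Prop := ∀ (paths : List (List Int)) (depots : List Int) (num_cities : Int), Dom_is_valid_multi_path paths depots num_cities → Pre_is_valid_multi_path paths depots num_cities → Spec_is_valid_multi_path paths depots num_cities (is_valid_multi_path paths depots num_cities)

-- ===== LEMMAS AND PROOFS =====

-- the per-pair failure test of B's fused zip loop
def pvFail (pd : List Int × Int) : Bool :=
  !(pd.1 == []) &&
    !(decide (3 ≤ pd.1.length) &&
      (PySem.List.pyGet? pd.1 0 == PySem.List.pyGet? pd.1 (-1)) &&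
      (PySem.List.pyGet? pd.1 (-1) == some pd.2))

lemma pvGet_zero (p : List Int) : PySem.List.pyGet? p 0 = p.head? := by
  cases p <;> simp [PySem.List.pyGet?, PySem.List.pyIdx?]

lemma pvSlice_interior (p : List Int) : PySem.List.slice p (some 1) (some (-1)) = pvInterior p := by
  cases p with
  | nil => rfl
  | cons a t =>
    have h : ¬ ((t.length : Int) < 0) := by omega
    simp [PySem.List.slice, PySem.List.clampIdx, List.dropLast_eq_take, pvInterior, h]

lemma pvFail_eq (pd : List Int × Int) :
    pvFail pd = (!(pd.1 == []) && !(pvPathOK pd.1 pd.2)) := by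
  unfold pvFail pvPathOK
  rw [pvGet_zero, PySem.List.pyGet?_neg_one]

lemma pvBLoop_none_iff (l : List (List Int × Int)) (acc : List Int) :
    pvBLoop l acc = none ↔ l.any pvFail := by
  induction l generalizing acc with
  | nil => simp [pvBLoop]
  | cons pd rest ih =>
    simp only [pvBLoop, List.any_cons, pvFail]
    split_ifs with h0 h1
    · simp [h0, ih]
    · simp [h0, h1]
    · have h1' : (decide (3 ≤ pd.1.length) &&
          (PySem.List.pyGet? pd.1 0 == PySem.List.pyGet? pd.1 (-1)) &&
          (PySem.List.pyGet? pd.1 (-1) == some pd.2)) = true := by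
        simpa using h1
      simp [h0, h1', ih]

lemma pvBLoop_ok (l : List (List Int × Int)) (acc : List Int)
    (h : l.any pvFail = false) :
    pvBLoop l acc =
      some (l.foldl (fun a pd =>
        if pd.1 == [] then a else a ++ PySem.List.slice pd.1 (some 1) (some (-1))) acc) := by
  induction l generalizing acc with
  | nil => simp [pvBLoop]
  | cons pd rest ih =>
    simp only [List.any_cons, Bool.or_eq_false_iff, pvFail] at h
    obtain ⟨hf, hrest⟩ := h
    by_cases h0 : (pd.1 == []) = true
    · have hp : pd.1 = [] := by simpa using h0
      simp [pvBLoop, ih _ hrest, hp]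
    · rw [Bool.and_eq_false_iff] at hf
      rcases hf with hf | hf
      · simp only [Bool.not_eq_false'] at hf; exact absurd hf h0
      · rw [Bool.not_eq_false'] at hf
        have hp : ¬ (pd.1 = []) := by simpa using h0
        simp only [pvBLoop, h0, if_false, hf, Bool.not_true, Bool.false_eq_true, List.foldl_cons]
        exact ih _ hrest

-- pointwise: not failing = (valid-or-empty) and (depot-match-or-empty)
lemma pvNotFail (p : List Int) (d : Int) :
    (!pvFail (p, d)) =
      ((p == [] || is_valid_path p) &&
       (p == [] || (PySem.List.pyGet? p 0 == some d))) := by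
  unfold pvFail is_valid_path
  cases h0 : (p == [])
  · simp only [Bool.false_or, Bool.not_false, Bool.true_and, Bool.not_not]
    cases h3 : decide (3 ≤ p.length)
    · simp
    · cases hl : (PySem.List.pyGet? p 0 == PySem.List.pyGet? p (-1))
      · simp
      · have : PySem.List.pyGet? p 0 = PySem.List.pyGet? p (-1) := by simpa using hl
        simp [this]
  · simp

lemma pvAll_and (l : List (List Int × Int)) (p q : (List Int × Int) → Bool) :
    (l.all fun x => p x && q x) = (l.all p && l.all q) := by
  induction l with
  | nil => simp
  | cons a t ih => simp only [List.all_cons, ih]; cases p a <;> cases q a <;> simp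

-- A's enumerate-indexed depot pass, rephrased over zip (lengths equal)
lemma pvPass2_eq (paths : List (List Int)) (depots : List Int)
    (hlen : paths.length = depots.length) :
    ((PySem.List.enumerate paths 0).all (fun ip =>
        if ip.2 == [] then true
        else PySem.List.pyGet? ip.2 0 == PySem.List.pyGet? depots ip.1)) =
      ((paths.zip depots).all (fun pd =>
        pd.1 == [] || (PySem.List.pyGet? pd.1 0 == some pd.2))) := by
  rw [Bool.eq_iff_iff]
  simp only [List.all_eq_true]
  constructor
  · intro h pd hpd
    obtain ⟨k, hk, hpd'⟩ := List.mem_iff_getElem.mp hpd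
    rw [List.getElem_zip] at hpd'
    have hk1 : k < paths.length := by
      simp only [List.length_zip] at hk; omega
    have he : ((0 : Int) + k, paths[k]) ∈ PySem.List.enumerate paths 0 := by
      rw [List.mem_iff_getElem]
      exact ⟨k, by rwa [PySem.List.length_enumerate], by rw [PySem.List.getElem_enumerate]⟩
    have h2 := h _ he
    rw [← hpd']
    simp only [zero_add] at h2
    rw [PySem.List.pyGet?_natCast] at h2
    by_cases hemp : (paths[k] == []) = true
    · simp [hemp]
    · simp only [hemp] at h2
      simp only [hemp, Bool.false_or]
      have hk2 : k < depots.length := by omega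
      simp only [List.getElem?_eq_getElem hk2] at h2
      exact h2
  · intro h ip hip
    obtain ⟨k, hk, hip'⟩ := List.mem_iff_getElem.mp hip
    rw [PySem.List.getElem_enumerate] at hip'
    have hk1 : k < paths.length := by rwa [PySem.List.length_enumerate] at hk
    have hk2 : k < depots.length := by omega
    have hz : (paths[k], depots[k]) ∈ paths.zip depots := by
      rw [List.mem_iff_getElem]
      refine ⟨k, by simp only [List.length_zip]; omega, by rw [List.getElem_zip]⟩
    have h2 := h _ hz
    rw [← hip']
    simp only [zero_add]
    by_cases hemp : (paths[k] == []) = true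
    · simp [hemp]
    · simp only [hemp, Bool.false_or] at h2
      simp only [hemp]
      rw [PySem.List.pyGet?_natCast, List.getElem?_eq_getElem hk2]
      exact h2

-- A's filtered validity pass, rephrased over zip (lengths equal)
lemma pvPass1_eq (paths : List (List Int)) (depots : List Int)
    (hlen : paths.length = depots.length) :
    ((paths.filter (fun p => !(p == []))).all is_valid_path) =
      ((paths.zip depots).all (fun pd => pd.1 == [] || is_valid_path pd.1)) := by
  rw [List.all_filter]
  have h1 : (paths.all fun p => !(!(p == [])) || is_valid_path p) =
      (paths.all fun p => p == [] || is_valid_path p) :=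
    List.all_congr rfl (fun p => by rw [Bool.not_not])
  rw [h1]
  have h2 : paths = (paths.zip depots).map Prod.fst :=
    (List.map_fst_zip (by omega)).symm
  conv_lhs => rw [h2]
  rw [List.all_map]
  exact List.all_congr rfl (fun pd => rfl)

-- no pair fails iff both of A's "all" passes succeed
lemma pvFail_iff_passes (paths : List (List Int)) (depots : List Int)
    (hlen : paths.length = depots.length) :
    ((paths.zip depots).any pvFail) =
      !(((paths.filter (fun p => !(p == []))).all is_valid_path) &&
        ((PySem.List.enumerate paths 0).all (fun ip =>
          if ip.2 == [] then true
          else PySem.List.pyGet? ip.2 0 == PySem.List.pyGet? depots ip.1))) := by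
  rw [List.any_eq_not_all_not]
  congr 1
  have hc : ((paths.zip depots).all fun pd => !pvFail pd) =
      ((paths.zip depots).all fun pd =>
        (pd.1 == [] || is_valid_path pd.1) &&
        (pd.1 == [] || (PySem.List.pyGet? pd.1 0 == some pd.2))) :=
    List.all_congr rfl (fun pd => pvNotFail pd.1 pd.2)
  rw [hc, pvAll_and, pvPass1_eq paths depots hlen, pvPass2_eq paths depots hlen]

-- the node-collecting fold is flatMap of the interiors
lemma pvFoldZip_eq_flatMap (l : List (List Int × Int)) (acc : List Int) :
    l.foldl (fun a pd => if pd.1 == [] then a else a ++ PySem.List.slice pd.1 (some 1) (some (-1))) acc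
      = acc ++ (l.map Prod.fst).flatMap pvInterior := by
  induction l generalizing acc with
  | nil => simp
  | cons pd t ih =>
    by_cases h0 : (pd.1 == []) = true
    · have hp : pd.1 = [] := by simpa using h0
      rw [List.foldl_cons, if_pos h0, ih, List.map_cons, List.flatMap_cons, hp]
      simp [pvInterior]
    · rw [List.foldl_cons, if_neg h0, pvSlice_interior, ih, List.map_cons, List.flatMap_cons,
        List.append_assoc]

lemma pvFold_eq_flatMap (l : List (List Int)) (acc : List Int) :
    l.foldl (fun a p => if p == [] then a else a ++ PySem.List.slice p (some 1) (some (-1))) acc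
      = acc ++ l.flatMap pvInterior := by
  induction l generalizing acc with
  | nil => simp
  | cons p t ih =>
    by_cases h0 : (p == []) = true
    · have hp : p = [] := by simpa using h0
      rw [List.foldl_cons, if_pos h0, ih, hp]
      simp [pvInterior]
    · rw [List.foldl_cons, if_neg h0, pvSlice_interior, ih, List.flatMap_cons,
        List.append_assoc]

theorem is_valid_multi_path_eq (paths : List (List Int)) (depots : List Int) (num_cities : Int)
    (hpre : Pre_is_valid_multi_path paths depots num_cities) :
    is_valid_multi_path paths depots num_cities = is_valid_multi_path_alt paths depots num_cities := by
  obtain ⟨hlen, hrest⟩ := hpre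
  unfold is_valid_multi_path is_valid_multi_path_alt
  have hlenb : (paths.length == depots.length) = true := by simpa using hlen
  simp only [hlenb, Bool.not_true, Bool.false_eq_true, if_false]
  by_cases hany : ((paths.zip depots).any pvFail) = true
  · -- some pair fails: B's loop returns none; one of A's two passes fails
    rw [(pvBLoop_none_iff _ []).mpr hany]
    have hiff := pvFail_iff_passes paths depots hlen
    rw [hany] at hiff
    have hand : (((paths.filter (fun p => !(p == []))).all is_valid_path) &&
        ((PySem.List.enumerate paths 0).all (fun ip =>
          if ip.2 == [] then true
          else PySem.List.pyGet? ip.2 0 == PySem.List.pyGet? depots ip.1))) = false := by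
      cases h : (((paths.filter (fun p => !(p == []))).all is_valid_path) &&
        ((PySem.List.enumerate paths 0).all (fun ip =>
          if ip.2 == [] then true
          else PySem.List.pyGet? ip.2 0 == PySem.List.pyGet? depots ip.1))) with
      | false => rfl
      | true => rw [h] at hiff; simp at hiff
    rcases Bool.and_eq_false_iff.mp hand with h | h
    · rw [h]; rfl
    · cases hc1 : ((paths.filter (fun p => !(p == []))).all is_valid_path)
      · rfl
      · rw [h]; rfl
  · -- no pair fails
    rw [Bool.not_eq_true] at hany
    rw [pvBLoop_ok _ [] hany]
    have hiff := pvFail_iff_passes paths depots hlen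
    rw [hany] at hiff
    have hand : (((paths.filter (fun p => !(p == []))).all is_valid_path) = true) ∧
        (((PySem.List.enumerate paths 0).all (fun ip =>
          if ip.2 == [] then true
          else PySem.List.pyGet? ip.2 0 == PySem.List.pyGet? depots ip.1)) = true) := by
      rw [← Bool.and_eq_true]
      cases h : (((paths.filter (fun p => !(p == []))).all is_valid_path) &&
        ((PySem.List.enumerate paths 0).all (fun ip =>
          if ip.2 == [] then true
          else PySem.List.pyGet? ip.2 0 == PySem.List.pyGet? depots ip.1))) with
      | true => rfl
      | false => rw [h] at hiff; simp at hiff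
    simp only [hand.1, hand.2, Bool.not_true, Bool.false_eq_true, if_false]
    -- Pre_'s first disjunct contradicts "no pair fails"
    have hcg : ((paths.zip depots).any pvFail) =
        ((paths.zip depots).any (fun pr => !(pr.1 == []) && !(pvPathOK pr.1 pr.2))) :=
      List.any_congr rfl (fun pd => pvFail_eq pd)
    have hdis : ((paths.zip depots).any (fun pr => !(pr.1 == []) && !(pvPathOK pr.1 pr.2))) = false := by
      rw [← hcg, hany]
    rcases hrest with hrest | ⟨hnodup, hsub1, hsub2⟩
    · rw [hdis] at hrest; exact absurd hrest (by simp)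
    set L := paths.flatMap pvInterior with hL
    -- both collected lists equal L
    have hbody : (fun (acc : List Int) (p : List Int) =>
        if !(p == []) then acc ++ PySem.List.slice p (some 1) (some (-1)) else acc) =
        (fun acc p => if p == [] then acc else acc ++ PySem.List.slice p (some 1) (some (-1))) := by
      funext acc p
      cases h : (p == []) <;> simp
    have hA : paths.foldl (fun acc p =>
        if !(p == []) then acc ++ PySem.List.slice p (some 1) (some (-1)) else acc) [] = L := by
      rw [hbody, pvFold_eq_flatMap, List.nil_append]
    have hB : (paths.zip depots).foldl (fun a pd =>
        if pd.1 == [] then a else a ++ PySem.List.slice pd.1 (some 1) (some (-1))) [] = L := by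
      rw [pvFoldZip_eq_flatMap, List.map_fst_zip (le_of_eq hlen), List.nil_append]
    rw [hA, hB]
    -- A's two assert conditions hold
    have hset : PySem.Set.ofList L = L := PySem.Set.ofList_eq_self_of_nodup L hnodup
    have hlenA : (L.length == PySem.Set.len (PySem.Set.ofList L)) = true := by
      rw [hset, PySem.Set.len_eq]; simp
    have hrangeNodup : (PySem.List.pyRange 1 num_cities 1).Nodup :=
      (PySem.List.pairwise_lt_pyRange_one 1 num_cities).imp (fun h => ne_of_lt h)
    have heq : PySem.Set.equal (PySem.Set.ofList L)
        (PySem.Set.ofList (PySem.List.pyRange 1 num_cities 1)) = true := by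
      rw [PySem.Set.equal_iff]
      intro x
      rw [PySem.Set.mem_ofList, PySem.Set.mem_ofList]
      exact ⟨fun h => hsub1 x h, fun h => hsub2 x h⟩
    -- B's sorted condition holds
    have hperm : (PySem.List.pyRange 1 num_cities 1).Perm L :=
      (List.perm_ext_iff_of_nodup hrangeNodup hnodup).mpr (fun x => ⟨fun h => hsub2 x h, fun h => hsub1 x h⟩)
    have hsorted : PySem.List.sorted L (fun x => x) false = PySem.List.pyRange 1 num_cities 1 :=
      PySem.List.sorted_eq_of_perm_of_pairwise_lt L (PySem.List.pyRange 1 num_cities 1)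
        (fun x => x) hperm (PySem.List.pairwise_lt_pyRange_one 1 num_cities)
    have hsortedb : (PySem.List.sorted L (fun x => x) false ==
        PySem.List.pyRange 1 num_cities 1) = true := by
      rw [hsorted]; simp
    rw [hlenA, heq, hsortedb]
    rfl

-- ===== VERDICT (by name: the statement is the Claim_ definition above) =====
theorem is_valid_multi_path_spec : Claim_equal_is_valid_multi_path := by
  intro paths depots num_cities _ hpre
  unfold Spec_is_valid_multi_path
  exact is_valid_multi_path_eq paths depots num_cities hpre
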